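-- pv_equiv track=rewrite | github.com/juye-ops/algorithm | Programmers/할인_행사.py | solution
-- ===== SOURCE A (Python) =====
-- def solution(want, number, discount):
--     answer = 0
--     target = dict(zip(want, number))
--     count = {}
--     for idx, x in enumerate(discount):
--         if count.get(x) is None:
--             count[x] = 0
--         count[x]+=1
--
--         if idx >= 10:
--             count[discount[idx-10]]-=1
--             if count[discount[idx-10]] == 0:
--                 del count[discount[idx-10]]
--
--         answer+=(target==count)
--
--     return answer
-- ===== SOURCE B (Python) =====
-- def solution(want, number, discount):
--     target = dict(zip(want, number))
--     answer = 0
--     for idx in range(len(discount)):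
--         w = discount[max(0, idx - 9): idx + 1]
--         c = {}
--         for x in w:
--             c[x] = c.get(x, 0) + 1
--         answer += (target == c)
--     return answer
-- ===== Notes on version B (the rewrite author's own statement) =====
-- stated objective: alternative
-- what changed: B replaces A's incremental sliding-window count dict (add new element, decrement/delete the element leaving the window) with an independent re-count: for every end index it slices the trailing window discount[max(0,idx-9):idx+1], builds its count dict from scratch and compares it to target.
import Mathlib
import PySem

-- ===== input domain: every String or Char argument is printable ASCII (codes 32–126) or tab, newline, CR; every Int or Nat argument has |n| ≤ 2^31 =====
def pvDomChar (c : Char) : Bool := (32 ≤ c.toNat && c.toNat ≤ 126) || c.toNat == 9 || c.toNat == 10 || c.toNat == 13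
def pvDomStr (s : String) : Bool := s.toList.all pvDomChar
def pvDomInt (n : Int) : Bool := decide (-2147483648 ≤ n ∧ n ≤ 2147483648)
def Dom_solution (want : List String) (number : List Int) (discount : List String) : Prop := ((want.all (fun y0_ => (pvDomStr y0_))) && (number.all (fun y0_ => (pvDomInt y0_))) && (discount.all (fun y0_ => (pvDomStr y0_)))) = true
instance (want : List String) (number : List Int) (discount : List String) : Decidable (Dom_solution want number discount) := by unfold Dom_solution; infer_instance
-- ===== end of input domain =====

-- B re-counts each trailing 10-window from scratch instead of maintaining A's incremental
-- count dict; same return value, similar cost (objective: alternative).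

-- Shared model of Python's 'd1 == d2' on dicts (order-insensitive mapping equality);
-- exact whenever both dicts have Nodup keys, which holds for every dict either program builds.
def pyDictEq (d1 d2 : PySem.Dict String Int) : Bool :=
  d1.items.length == d2.items.length && d1.items.all (fun p => d2.get? p.1 == some p.2)

-- ===== PORT A =====
-- loop body of A (idx, x) ↦ state update; discount[idx-10] is always in range when 10 ≤ idx,
-- so pyGetD's default "" is never used
def stepA (discount : List String) (target : PySem.Dict String Int)
    (st : Int × PySem.Dict String Int) (p : Int × String) : Int × PySem.Dict String Int :=
  let count := if (st.2.get? p.2).isNone then st.2.insert p.2 0 else st.2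
  let count := count.modify p.2 0 (· + 1)
  let count :=
    if 10 ≤ p.1 then
      let y := PySem.List.pyGetD discount (p.1 - 10) ""
      let count := count.modify y 0 (· - 1)
      if count.getD y 0 == 0 then count.erase y else count
    else count
  (st.1 + (if pyDictEq target count then 1 else 0), count)

def solution (want : List String) (number : List Int) (discount : List String) : Int :=
  let target := PySem.Dict.ofList (want.zip number)
  ((PySem.List.enumerate discount).foldl (stepA discount target) (0, PySem.Dict.empty)).1

-- ===== PORT B =====
-- loop body of B: recount the trailing window ending at idx and compare with target
def stepB (discount : List String) (target : PySem.Dict String Int)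
    (answer : Int) (idx : Int) : Int :=
  let w := PySem.List.slice discount (some (max 0 (idx - 9))) (some (idx + 1))
  let c := w.foldl (fun d x => d.insert x (d.getD x 0 + 1)) PySem.Dict.empty
  answer + (if pyDictEq target c then 1 else 0)

def solution_alt (want : List String) (number : List Int) (discount : List String) : Int :=
  let target := PySem.Dict.ofList (want.zip number)
  (PySem.List.pyRange 0 (PySem.List.len discount)).foldl (stepB discount target) 0

-- ===== PRECONDITION & SPEC =====
def Spec_solution (want : List String) (number : List Int) (discount : List String) (out : Int) : Prop := out = solution_alt want number discount
instance (want : List String) (number : List Int) (discount : List String) (out : Int) : Decidable (Spec_solution want number discount out) := by unfold Spec_solution; infer_instance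

-- ===== CLAIM (what is proved, stated in full; the proofs are below) =====
def Claim_equal_solution : Prop := ∀ (want : List String) (number : List Int) (discount : List String), Dom_solution want number discount → Spec_solution want number discount (solution want number discount)

-- ===== LEMMAS AND PROOFS =====

-- the window of discount that A's count dict describes after m processed elements
def pvWin (discount : List String) (m : Nat) : List String := (discount.take m).drop (m - 10)

-- what looking up k in a Python dict of the multiset of w returns
def pvGet (w : List String) (k : String) : Option Int :=
  if w.count k = 0 then none else some (w.count k)

def pvFoldA (discount : List String) (target : PySem.Dict String Int) (m : Nat) :
    Int × PySem.Dict String Int :=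
  (PySem.List.pyRange 0 (m : Int)).foldl
    (fun st j => stepA discount target st (j, PySem.List.pyGetD discount j "")) (0, PySem.Dict.empty)

def pvFoldB (discount : List String) (target : PySem.Dict String Int) (m : Nat) : Int :=
  (PySem.List.pyRange 0 (m : Int)).foldl (stepB discount target) 0

lemma get?_erase (d : PySem.Dict String Int) (k k' : String) :
    (d.erase k).get? k' = if k' = k then none else d.get? k' := by
  simp only [PySem.Dict.erase, PySem.Dict.get?]
  by_cases hk : k' = k
  · subst hk
    rw [if_pos rfl, List.find?_filter, List.find?_eq_none.mpr ?_, Option.map_none]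
    intro x _
    by_cases hx : x.1 = k' <;> simp [hx]
  · rw [if_neg hk, List.find?_filter]
    have hpred : (fun (a : String × Int) => decide ((!a.1 == k) = true ∧ (a.1 == k') = true)) =
        (fun a => a.1 == k') := by
      funext a
      by_cases ha : a.1 = k' <;> simp [ha, hk]
    rw [hpred]

lemma nodup_keys_erase (d : PySem.Dict String Int) (k : String) (h : d.keys.Nodup) :
    (d.erase k).keys.Nodup := by
  simp only [PySem.Dict.erase, PySem.Dict.keys] at *
  exact (List.Sublist.map _ List.filter_sublist).nodup h

lemma counter_get? (xs : List String) (k : String) :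
    (PySem.Dict.counter xs).get? k = pvGet xs k := by
  have hc := PySem.Dict.contains_counter xs k
  rw [PySem.Dict.contains_eq_isSome_get?] at hc
  have hg := PySem.Dict.getD_counter xs k
  rw [PySem.Dict.getD_eq_get?_getD] at hg
  unfold pvGet
  by_cases hmem : k ∈ xs
  · have h0 : xs.count k ≠ 0 := by simpa [List.count_eq_zero] using hmem
    simp only [if_neg h0]
    cases hx : (PySem.Dict.counter xs).get? k with
    | none => rw [hx] at hc; simp at hc; simp [hmem] at hc
    | some v => rw [hx] at hg; simp at hg; rw [hg]
  · have h0 : xs.count k = 0 := by simpa [List.count_eq_zero] using hmem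
    simp only [if_pos h0]
    cases hx : (PySem.Dict.counter xs).get? k with
    | none => rfl
    | some v => rw [hx] at hc; simp at hc; simp [hmem] at hc

lemma pyDictEq_congr (t d d' : PySem.Dict String Int)
    (hd : d.keys.Nodup) (hd' : d'.keys.Nodup) (h : ∀ k, d.get? k = d'.get? k) :
    pyDictEq t d = pyDictEq t d' := by
  have hkeys : d.keys.Perm d'.keys := by
    rw [List.perm_ext_iff_of_nodup hd hd']
    intro a
    constructor <;> intro ha
    · by_contra hb
      have := (PySem.Dict.get?_eq_none_iff_not_mem_keys d' a).mpr hb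
      rw [← h] at this
      exact ((PySem.Dict.get?_eq_none_iff_not_mem_keys d a).mp this) ha
    · by_contra hb
      have := (PySem.Dict.get?_eq_none_iff_not_mem_keys d a).mpr hb
      rw [h] at this
      exact ((PySem.Dict.get?_eq_none_iff_not_mem_keys d' a).mp this) ha
  have hlen : d.items.length = d'.items.length := by
    have := hkeys.length_eq
    simpa [PySem.Dict.keys] using this
  unfold pyDictEq
  rw [hlen]
  simp only [h]

lemma pvWin_succ_lt {discount : List String} {m : Nat} (hm : m < discount.length) (h10 : m < 10) :
    pvWin discount (m + 1) = pvWin discount m ++ [discount[m]] := by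
  unfold pvWin
  have h1 : m + 1 - 10 = 0 := by omega
  have h2 : m - 10 = 0 := by omega
  rw [h1, h2, List.drop_zero, List.drop_zero, List.take_add_one, List.getElem?_eq_getElem hm]
  rfl

lemma pvWin_succ_ge {discount : List String} {m : Nat} (hm : m < discount.length) (h10 : 10 ≤ m) :
    pvWin discount m = discount[m - 10]'(by omega) :: (discount.take m).drop (m - 9) ∧
    pvWin discount (m + 1) = (discount.take m).drop (m - 9) ++ [discount[m]] := by
  have hlen : (discount.take m).length = m := by simp; omega
  constructor
  · unfold pvWin
    rw [List.drop_eq_getElem_cons (by omega)]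
    congr 1
    · rw [List.getElem_take]
    · congr 1; omega
  · unfold pvWin
    have h1 : m + 1 - 10 = m - 9 := by omega
    rw [h1, List.take_add_one, List.getElem?_eq_getElem hm, List.drop_append_of_le_length (by omega)]
    rfl

lemma slice_eq_pvWin (discount : List String) (m : Nat) :
    PySem.List.slice discount (some (max 0 ((m : Int) - 9))) (some ((m : Int) + 1)) =
      pvWin discount (m + 1) := by
  rw [PySem.List.slice_toNat discount (le_max_left _ _) (by omega)]
  have ha : (max 0 ((m : Int) - 9)).toNat = m - 9 := by omega
  have hb : ((m : Int) + 1).toNat = m + 1 := by omega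
  rw [ha, hb]
  unfold pvWin
  rw [List.drop_take]
  congr 1

lemma pvFoldA_succ (discount : List String) (target : PySem.Dict String Int) (m : Nat) :
    pvFoldA discount target (m + 1) =
      stepA discount target (pvFoldA discount target m)
        ((m : Int), PySem.List.pyGetD discount (m : Int) "") := by
  unfold pvFoldA
  rw [show ((m + 1 : Nat) : Int) = (m : Int) + 1 by push_cast; ring,
    PySem.List.pyRange_one_succ_right (by positivity), List.foldl_append]
  rfl

lemma pvFoldB_succ (discount : List String) (target : PySem.Dict String Int) (m : Nat) :
    pvFoldB discount target (m + 1) = stepB discount target (pvFoldB discount target m) (m : Int) := by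
  unfold pvFoldB
  rw [show ((m + 1 : Nat) : Int) = (m : Int) + 1 by push_cast; ring,
    PySem.List.pyRange_one_succ_right (by positivity), List.foldl_append]
  rfl

lemma pvGetD_count (w : List String) (k : String) : (pvGet w k).getD 0 = (w.count k : Int) := by
  unfold pvGet
  split_ifs with h <;> simp [h]

lemma pvGet_eq_none_iff (w : List String) (k : String) : pvGet w k = none ↔ w.count k = 0 := by
  unfold pvGet
  split_ifs with h <;> simp [h]

lemma pvGet_eq_some (w : List String) (k : String) (h : w.count k ≠ 0) :
    pvGet w k = some ((w.count k : Int)) := by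
  unfold pvGet
  rw [if_neg h]

lemma pvAssemble (target : PySem.Dict String Int) (a : Int) (c : PySem.Dict String Int)
    (w' : List String) (h1 : c.keys.Nodup) (h2 : ∀ k, c.get? k = pvGet w' k) :
    c.keys.Nodup ∧ (∀ k, c.get? k = pvGet w' k) ∧
    (a + if pyDictEq target c then 1 else 0) =
      a + (if pyDictEq target (PySem.Dict.counter w') then 1 else 0) := by
  refine ⟨h1, h2, ?_⟩
  rw [pyDictEq_congr target c (PySem.Dict.counter w') h1 (PySem.Dict.nodup_keys_counter w')
    (fun k => (h2 k).trans (counter_get? w' k).symm)]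

lemma stepA_char (discount : List String) (target : PySem.Dict String Int) (m : Nat)
    (hm : m < discount.length) (st : Int × PySem.Dict String Int)
    (hnd : st.2.keys.Nodup) (hget : ∀ k, st.2.get? k = pvGet (pvWin discount m) k) :
    (stepA discount target st ((m : Int), PySem.List.pyGetD discount (m : Int) "")).2.keys.Nodup ∧
    (∀ k, (stepA discount target st ((m : Int), PySem.List.pyGetD discount (m : Int) "")).2.get? k =
      pvGet (pvWin discount (m + 1)) k) ∧
    (stepA discount target st ((m : Int), PySem.List.pyGetD discount (m : Int) "")).1 =
      st.1 + (if pyDictEq target (PySem.Dict.counter (pvWin discount (m + 1))) then 1 else 0) := by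
  have hx : PySem.List.pyGetD discount (m : Int) "" = discount[m] := by
    rw [PySem.List.pyGetD_eq_getElem discount "" (by positivity) (by exact_mod_cast hm)]
    simp
  rw [hx]
  simp only [stepA]
  set x := discount[m] with hxdef
  set d1 := (if (st.2.get? x).isNone = true then st.2.insert x 0 else st.2) with hd1
  set d2 := d1.modify x 0 (fun v => v + 1) with hd2def
  have hd1nd : d1.keys.Nodup := by
    rw [hd1]; split_ifs
    · exact PySem.Dict.nodup_keys_insert _ _ _ hnd
    · exact hnd
  have hd1x : d1.getD x 0 = ((pvWin discount m).count x : Int) := by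
    rw [hd1]
    split_ifs with hab
    · have h0 : pvGet (pvWin discount m) x = none := by
        rw [← hget]; exact Option.isNone_iff_eq_none.mp hab
      have hc0 : (pvWin discount m).count x = 0 := (pvGet_eq_none_iff _ _).mp h0
      rw [PySem.Dict.getD_insert_self, hc0]; simp
    · rw [PySem.Dict.getD_eq_get?_getD, hget, pvGetD_count]
  have hd1ne : ∀ k, k ≠ x → d1.get? k = pvGet (pvWin discount m) k := by
    intro k hk
    rw [hd1]; split_ifs
    · rw [PySem.Dict.get?_insert_of_ne _ _ hk]; exact hget k
    · exact hget k
  have hd2g : ∀ k, d2.get? k =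
      if k = x then some (((pvWin discount m).count x : Int) + 1)
      else pvGet (pvWin discount m) k := by
    intro k
    rw [hd2def]
    simp only [PySem.Dict.modify]
    rw [PySem.Dict.get?_insert, hd1x]
    split_ifs with hk
    · rfl
    · exact hd1ne k hk
  have hd2nd : d2.keys.Nodup := by
    rw [hd2def]; simp only [PySem.Dict.modify]
    exact PySem.Dict.nodup_keys_insert _ _ _ hd1nd
  by_cases h10 : 10 ≤ (m : Int)
  · simp only [if_pos h10]
    have h10n : 10 ≤ m := by exact_mod_cast h10
    have hy : PySem.List.pyGetD discount ((m : Int) - 10) "" = discount[m - 10]'(by omega) := by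
      rw [PySem.List.pyGetD_eq_getElem discount "" (by omega) (by omega)]
      congr 1
      omega
    rw [hy]
    set y := discount[m - 10]'(by omega) with hydef
    obtain ⟨hwm, hwm1⟩ := pvWin_succ_ge hm h10n
    rw [← hydef] at hwm
    rw [← hxdef] at hwm1
    set T := (discount.take m).drop (m - 9) with hT
    have hcw : ∀ k, (pvWin discount m).count k = T.count k + (if y = k then 1 else 0) := by
      intro k
      rw [hwm]
      simp only [List.count_cons, beq_iff_eq]
    have hcw1 : ∀ k, (pvWin discount (m + 1)).count k = T.count k + (if x = k then 1 else 0) := by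
      intro k
      rw [hwm1]
      simp only [List.count_append, List.count_cons, List.count_nil, beq_iff_eq, Nat.zero_add]
    set d3 := d2.modify y 0 (fun v => v - 1) with hd3def
    have hvy : d2.getD y 0 = (T.count y : Int) + (if y = x then 1 else 0) + 1 := by
      rw [PySem.Dict.getD_eq_get?_getD, hd2g y]
      split_ifs with hk
      · have hxc : (pvWin discount m).count x = T.count x + 1 := by
          rw [hcw x, if_pos hk]
        rw [Option.getD_some, hxc, hk]
        push_cast
        ring
      · rw [pvGetD_count, hcw y, if_pos rfl]
        push_cast
        ring
    have hd3get : ∀ k, d3.get? k = if k = y then some (d2.getD y 0 - 1) else d2.get? k := by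
      intro k
      rw [hd3def]
      simp only [PySem.Dict.modify]
      rw [PySem.Dict.get?_insert]
    have hd3nd : d3.keys.Nodup := by
      rw [hd3def]; simp only [PySem.Dict.modify]
      exact PySem.Dict.nodup_keys_insert _ _ _ hd2nd
    have hd3y : d3.getD y 0 = d2.getD y 0 - 1 := by
      rw [hd3def]; simp only [PySem.Dict.modify]
      rw [PySem.Dict.getD_insert_self]
    -- a key other than y is unaffected by the decrement/delete phase
    have hother : ∀ k, ¬ k = y → d2.get? k = pvGet (pvWin discount (m + 1)) k := by
      intro k hky
      rw [hd2g k]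
      split_ifs with hkx
      · have hc1 : (pvWin discount (m + 1)).count k = T.count k + 1 := by
          rw [hcw1 k, if_pos hkx.symm]
        have hc2 : (pvWin discount m).count k = T.count k := by
          rw [hcw k, if_neg (fun h => hky h.symm), Nat.add_zero]
        rw [eq_comm, pvGet_eq_some _ _ (by omega), hc1, ← hc2, hkx]
        norm_cast
      · have hsame : (pvWin discount (m + 1)).count k = (pvWin discount m).count k := by
          rw [hcw k, hcw1 k, if_neg (fun h : y = k => hky h.symm), if_neg (fun h : x = k => hkx h.symm)]
        unfold pvGet
        rw [hsame]
    refine pvAssemble target st.1 _ _ ?_ ?_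
    · split_ifs
      · exact nodup_keys_erase _ _ hd3nd
      · exact hd3nd
    · intro k
      split_ifs with hz
      -- the decremented count hit zero: y is removed from the dict and leaves the window
      · simp only [beq_iff_eq] at hz
        rw [hd3y, hvy] at hz
        have hyx : ¬ y = x := by
          intro h
          rw [if_pos h] at hz
          omega
        have hT0 : T.count y = 0 := by
          rw [if_neg hyx] at hz
          omega
        rw [get?_erase]
        by_cases hky : k = y
        · rw [if_pos hky, eq_comm, pvGet_eq_none_iff, hcw1 k, hky, if_neg (fun h => hyx h.symm), hT0]
        · rw [if_neg hky, hd3get k, if_neg hky]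
          exact hother k hky
      -- count still positive: y stays with the decremented count
      · simp only [beq_iff_eq] at hz
        rw [hd3y, hvy] at hz
        rw [hd3get k]
        by_cases hky : k = y
        · rw [if_pos hky]
          have hc0 : (pvWin discount (m + 1)).count k ≠ 0 := by
            rw [hcw1 k, hky]
            by_cases h : y = x
            · rw [if_pos h] at hz
              rw [if_pos (h.symm)]
              omega
            · rw [if_neg h] at hz
              rw [if_neg (fun hc => h hc.symm)]
              omega
          rw [eq_comm, pvGet_eq_some _ _ hc0, hvy, hcw1 k, hky]
          congr 1
          by_cases h : y = x
          · rw [if_pos h, if_pos h.symm]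
            push_cast
            ring
          · rw [if_neg h, if_neg (fun hc => h hc.symm)]
            push_cast
            ring
        · rw [if_neg hky]
          exact hother k hky
  · simp only [if_neg h10]
    have h10n : m < 10 := by omega
    have hw1 := pvWin_succ_lt hm h10n
    rw [← hxdef] at hw1
    have hc : ∀ j : String, (pvWin discount m ++ [x]).count j =
        (pvWin discount m).count j + (if x = j then 1 else 0) := by
      intro j
      simp only [List.count_append, List.count_cons, List.count_nil, beq_iff_eq, Nat.zero_add]
    refine pvAssemble target st.1 _ _ hd2nd ?_
    intro k
    rw [hd2g k, hw1]
    split_ifs with hkx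
    · rw [eq_comm, pvGet_eq_some _ _ (by rw [hc k, if_pos hkx.symm]; omega), hc k, if_pos hkx.symm, hkx]
      norm_cast
    · have hsame : (pvWin discount m ++ [x]).count k = (pvWin discount m).count k := by
        rw [hc k, if_neg (fun h : x = k => hkx h.symm), Nat.add_zero]
      unfold pvGet
      rw [hsame]

lemma pvInv (discount : List String) (target : PySem.Dict String Int) :
    ∀ m, m ≤ discount.length →
      (pvFoldA discount target m).2.keys.Nodup ∧
      (∀ k, (pvFoldA discount target m).2.get? k = pvGet (pvWin discount m) k) ∧
      (pvFoldA discount target m).1 = pvFoldB discount target m := by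
  intro m
  induction m with
  | zero =>
    intro _
    refine ⟨?_, ?_, rfl⟩
    · simp [pvFoldA, PySem.List.pyRange, PySem.Dict.empty, PySem.Dict.keys]
    · intro k
      simp [pvFoldA, pvWin, pvGet, PySem.List.pyRange, PySem.Dict.empty, PySem.Dict.get?]
  | succ m ih =>
    intro h1
    obtain ⟨hnd, hget, hans⟩ := ih (by omega)
    obtain ⟨h1', h2', h3'⟩ := stepA_char discount target m (by omega) _ hnd hget
    rw [pvFoldA_succ, pvFoldB_succ]
    refine ⟨h1', h2', ?_⟩
    rw [h3', hans]
    simp only [stepB]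
    rw [slice_eq_pvWin, PySem.Dict.foldl_insert_getD_add_one_eq_counter]

-- ===== VERDICT (by name: the statement is the Claim_ definition above) =====
theorem solution_spec : Claim_equal_solution := by
  intro want number discount _
  show solution want number discount = solution_alt want number discount
  have h := (pvInv discount (PySem.Dict.ofList (want.zip number)) discount.length le_rfl).2.2
  unfold solution solution_alt
  rw [PySem.List.enumerate_eq_map_pyRange discount ""]
  simpa [pvFoldA, pvFoldB, List.foldl_map, PySem.List.len_eq] using h
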